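-- pv_equiv track=rewrite | github.com/berkeyildiz/CourseSchedulePlanner | CourseSelector/schedule/views.py | convert_course_date
-- ===== SOURCE A (Python) =====
-- def convert_course_date(date):
--
--     test = date.split(" ", 1)
--     a = test[0]
--     b = test[1]
--     g = list(map(str, a))
--     i = 0
--     while i < len(g)-1:
--         if g[i] == 'T' and g[i + 1] == 'h':
--             g[i] = g[i] + g[i + 1]
--             g.pop(i + 1)
--         else:
--             i += 1
--
--     schedule_place = ''
--     for i in range(0, len(g)):
--         schedule_place = schedule_place + g[i] + b[i]
--
--     return schedule_place
-- ===== SOURCE B (Python) =====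
-- def convert_course_date(date):
--     a, b = date.split(" ", 1)
--     tokens = []
--     for c in a:
--         if c == 'h' and tokens and tokens[-1] == 'T':
--             tokens[-1] = tokens[-1] + c
--         else:
--             tokens.append(c)
--     return ''.join(t + ch for t, ch in zip(tokens, b))
-- ===== Notes on version B (the rewrite author's own statement) =====
-- stated objective: simpler
-- what changed: A merges each T-followed-by-h pair by repeatedly mutating and popping from the character list under a while-loop index and then interleaves by explicit indexing; B builds the token list in one forward pass (extending a trailing T token) and interleaves with zip/join.
import Mathlib
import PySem

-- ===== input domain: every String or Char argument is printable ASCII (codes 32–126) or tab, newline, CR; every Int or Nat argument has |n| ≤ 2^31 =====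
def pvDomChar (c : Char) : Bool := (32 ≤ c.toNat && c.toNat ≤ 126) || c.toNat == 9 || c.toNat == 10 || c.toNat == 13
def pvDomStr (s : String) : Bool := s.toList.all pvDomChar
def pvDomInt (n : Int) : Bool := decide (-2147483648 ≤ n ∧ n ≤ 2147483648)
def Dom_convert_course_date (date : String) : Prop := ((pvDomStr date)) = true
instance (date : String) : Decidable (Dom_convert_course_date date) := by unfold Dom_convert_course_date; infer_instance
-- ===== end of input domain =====

-- B replaces A's in-place pop/while merge of the Thursday (T,h) char pair by a one-pass token builder and the
-- indexed interleave by zip/join; objective: simpler.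

-- ===== PORT A =====
-- Python strings are ported through List Char (PySem.Chars side); g is Python's list of
-- one-character strings, here List (List Char).
-- A's while-loop: i, g mutable; merge g[i]+g[i+1] and pop when they are T,h; else i += 1.
-- A's while-loop with an explicit fuel (= len(g) at entry, an upper bound on the number of
-- iterations: each one strictly decreases len(g) - i, which starts at len(g)); the fuel only
-- makes the same computation total, the loop body is A's step for step.
def mergeA : Nat → List (List Char) → Nat → List (List Char)
  | 0, g, _ => g
  | fuel + 1, g, i =>
    if i < g.length - 1 then
      if g.getD i [] = ['T'] ∧ g.getD (i + 1) [] = ['h'] then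
        mergeA fuel ((g.set i (g.getD i [] ++ g.getD (i + 1) [])).eraseIdx (i + 1)) i
      else
        mergeA fuel g (i + 1)
    else g

def convert_course_date (date : String) : String :=
  let test := (PySem.Str.splitMax? date " " 1).getD []   -- date.split(" ", 1); sep ≠ "" so never none
  let a := (test.getD 0 "").toList                        -- test[0]
  let b := (test.getD 1 "").toList                        -- test[1]; IndexError when no space: excluded by Pre_
  let g := a.map (fun c => [c])                           -- list(map(str, a))
  let g2 := mergeA g.length g 0
  -- for i in range(0, len(g)): schedule_place += g[i] + b[i]
  -- b.getD i ' ' is b[i]; the index is in range under Pre_ (out of range = IndexError)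
  String.mk ((List.range g2.length).foldl
    (fun s i => s ++ g2.getD i [] ++ [b.getD i ' ']) [])

-- ===== PORT B =====
def convert_course_date_alt (date : String) : String :=
  let test := (PySem.Str.splitMax? date " " 1).getD []   -- a, b = date.split(" ", 1)
  let a := (test.getD 0 "").toList
  let b := (test.getD 1 "").toList                        -- unpack fails when no space: excluded by Pre_
  -- one forward pass: extend a trailing T token by the current h, else start a new token
  let tokens := a.foldl
    (fun ts c =>
      if c = 'h' ∧ ts ≠ [] ∧ ts.getLast? = some ['T'] then
        ts.dropLast ++ [(ts.getLast?).getD [] ++ [c]]     -- tokens[-1] = tokens[-1] + c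
      else ts ++ [[c]]) []                                -- tokens.append(c)
  -- ''.join(t + ch for t, ch in zip(tokens, b))
  String.mk (((tokens.zip b).map (fun p => p.1 ++ [p.2])).flatten)

-- ===== PRECONDITION & SPEC =====
-- Pre_: A returns exactly when date contains a space (split gives two fields) and the second
-- field has at least as many characters as the first has day tokens (= its length minus the
-- number of adjacent T,h pairs, which never overlap); otherwise A raises IndexError.
def Pre_convert_course_date (date : String) : Prop :=
  let test := (PySem.Str.splitMax? date " " 1).getD []
  test.length = 2 ∧
    (let a := (test.getD 0 "").toList
     let b := (test.getD 1 "").toList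
     a.length - (a.zip a.tail).countP (fun p => p.1 == 'T' && p.2 == 'h') ≤ b.length)
instance (date : String) : Decidable (Pre_convert_course_date date) := by
  unfold Pre_convert_course_date; infer_instance

def pvWitness_convert_course_date : String := "TTh 123"

def Spec_convert_course_date (date : String) (out : String) : Prop := out = convert_course_date_alt date
instance (date : String) (out : String) : Decidable (Spec_convert_course_date date out) := by unfold Spec_convert_course_date; infer_instance

-- ===== CLAIM (what is proved, stated in full; the proofs are below) =====
def Claim_equal_convert_course_date : Prop := ∀ (date : String), Dom_convert_course_date date → Pre_convert_course_date date → Spec_convert_course_date date (convert_course_date date)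

-- ===== LEMMAS AND PROOFS =====

-- the merged token list, recursively: a 'T' immediately followed by 'h' becomes one token
def tok : List Char → List (List Char)
  | [] => []
  | [c] => [[c]]
  | c :: d :: rest => if c = 'T' ∧ d = 'h' then ['T', 'h'] :: tok rest else [c] :: tok (d :: rest)

theorem pv_getD_append_length {α : Type} (ts : List α) (x : α) (r : List α) (d : α) :
    (ts ++ x :: r).getD ts.length d = x := by
  induction ts with
  | nil => rfl
  | cons y ys ih => simpa using ih

theorem pv_getD_append_length_succ {α : Type} (ts : List α) (x : α) (r : List α) (d : α) :
    (ts ++ x :: r).getD (ts.length + 1) d = r.getD 0 d := by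
  induction ts with
  | nil => rfl
  | cons y ys ih => simpa using ih

theorem pv_set_append_length {α : Type} (ts : List α) (x : α) (r : List α) (y : α) :
    (ts ++ x :: r).set ts.length y = ts ++ y :: r := by
  induction ts with
  | nil => rfl
  | cons z zs ih => simpa using ih

theorem pv_eraseIdx_append_length_succ {α : Type} (ts : List α) (x y : α) (r : List α) :
    (ts ++ x :: y :: r).eraseIdx (ts.length + 1) = ts ++ x :: r := by
  induction ts with
  | nil => rfl
  | cons z zs ih => simpa using ih

theorem mergeA_exit (fuel : Nat) (g : List (List Char)) (i : Nat) (h : ¬ i < g.length - 1) :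
    mergeA fuel g i = g := by
  cases fuel <;> simp [mergeA, h]

theorem mergeA_spec (l : List Char) (ts : List (List Char)) (fuel : Nat)
    (hf : l.length ≤ fuel) :
    mergeA fuel (ts ++ l.map (fun c => [c])) ts.length = ts ++ tok l := by
  induction l using tok.induct generalizing ts fuel with
  | case1 =>
      rw [mergeA_exit _ _ _ (by simp)]
      simp [tok]
  | case2 c =>
      rw [mergeA_exit _ _ _ (by simp)]
      simp [tok]
  | case3 c d rest hcd ih =>
      obtain ⟨hc, hd⟩ := hcd; subst hc; subst hd
      obtain ⟨f, rfl⟩ : ∃ f, fuel = f + 1 := ⟨fuel - 1, by simp at hf; omega⟩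
      rw [mergeA]
      simp only [List.map_cons]
      rw [if_pos (by simp only [List.length_append, List.length_cons, List.length_map]; omega)]
      rw [pv_getD_append_length, pv_getD_append_length_succ]
      simp only [List.getD_cons_zero]
      rw [if_pos (by simp)]
      rw [pv_set_append_length, pv_eraseIdx_append_length_succ]
      simp only [List.singleton_append]
      -- one more unfold: the merged token "Th" is not "T", so i advances
      cases rest with
      | nil =>
          rw [mergeA_exit _ _ _ (by simp)]
          simp [tok]
      | cons e r2 =>
          obtain ⟨f', rfl⟩ : ∃ f', f = f' + 1 := ⟨f - 1, by simp at hf; omega⟩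
          rw [mergeA]
          rw [if_pos (by simp only [List.length_append, List.length_cons, List.length_map]; omega)]
          rw [if_neg (by rw [pv_getD_append_length]; simp)]
          have h2 := ih (ts := ts ++ [['T', 'h']]) (fuel := f') (by simp at hf ⊢; omega)
          simp only [List.append_assoc, List.singleton_append, List.length_append,
            List.length_cons, List.length_nil] at h2
          rw [show tok ('T' :: 'h' :: e :: r2) = ['T', 'h'] :: tok (e :: r2) by rw [tok]; simp]
          exact h2
  | case4 c d rest hcd ih =>
      obtain ⟨f, rfl⟩ : ∃ f, fuel = f + 1 := ⟨fuel - 1, by simp at hf; omega⟩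
      rw [mergeA]
      simp only [List.map_cons]
      rw [if_pos (by simp only [List.length_append, List.length_cons, List.length_map]; omega)]
      rw [if_neg (by
        rw [pv_getD_append_length, pv_getD_append_length_succ]
        simp only [List.getD_cons_zero]
        intro h
        exact hcd ⟨by simpa using congrArg (fun l => l.getD 0 ' ') h.1,
                   by simpa using congrArg (fun l => l.getD 0 ' ') h.2⟩)]
      have h2 := ih (ts := ts ++ [[c]]) (fuel := f) (by simp at hf ⊢; omega)
      simp only [List.append_assoc, List.singleton_append, List.length_append,
        List.length_cons, List.length_nil, List.map_cons] at h2
      rw [show tok (c :: d :: rest) = [c] :: tok (d :: rest) by rw [tok]; rw [if_neg hcd]]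
      exact h2

def stepB (ts : List (List Char)) (c : Char) : List (List Char) :=
  if c = 'h' ∧ ts ≠ [] ∧ ts.getLast? = some ['T'] then
    ts.dropLast ++ [(ts.getLast?).getD [] ++ [c]]
  else ts ++ [[c]]

theorem foldB_spec (l : List Char) (ts : List (List Char))
    (h : ts.getLast? = some ['T'] → l.head? ≠ some 'h') :
    l.foldl stepB ts = ts ++ tok l := by
  induction l using tok.induct generalizing ts with
  | case1 => simp [tok]
  | case2 c =>
      simp only [List.foldl_cons, List.foldl_nil, stepB, tok]
      rw [if_neg (by
        rintro ⟨hc, -, hlast⟩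
        exact h hlast (by simp [hc]))]
  | case3 c d rest hcd ih =>
      obtain ⟨hc, hd⟩ := hcd; subst hc; subst hd
      rw [List.foldl_cons, List.foldl_cons]
      rw [show stepB ts 'T' = ts ++ [['T']] from if_neg (by rintro ⟨h1, -⟩; exact absurd h1 (by decide))]
      rw [show stepB (ts ++ [['T']]) 'h' = ts ++ [['T', 'h']] by
        rw [stepB, if_pos ⟨rfl, by simp, by simp⟩]; simp]
      rw [ih (ts := ts ++ [['T', 'h']]) (by simp)]
      rw [show tok ('T' :: 'h' :: rest) = ['T', 'h'] :: tok rest by rw [tok]; simp]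
      simp
  | case4 c d rest hcd ih =>
      rw [List.foldl_cons]
      rw [show stepB ts c = ts ++ [[c]] from if_neg (by
        rintro ⟨hc, -, hlast⟩
        exact h hlast (by simp [hc]))]
      rw [ih (ts := ts ++ [[c]]) (by
        intro hlast
        simp only [List.getLast?_append, List.getLast?_singleton] at hlast
        have hc : c = 'T' := by simpa using congrArg (fun l => l.getD 0 ' ') (Option.some.inj hlast)
        intro hdh
        exact hcd ⟨hc, by simpa using hdh⟩)]
      rw [show tok (c :: d :: rest) = [c] :: tok (d :: rest) by rw [tok]; rw [if_neg hcd]]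
      simp

theorem tok_length (l : List Char) :
    (tok l).length + (l.zip l.tail).countP (fun p => p.1 == 'T' && p.2 == 'h') = l.length := by
  induction l using tok.induct with
  | case1 => rfl
  | case2 c => rfl
  | case3 c d rest hcd ih =>
      obtain ⟨hc, hd⟩ := hcd; subst hc; subst hd
      have hz : (('h' :: rest).zip rest).countP (fun p => p.1 == 'T' && p.2 == 'h')
          = (rest.zip rest.tail).countP (fun p => p.1 == 'T' && p.2 == 'h') := by
        cases rest with
        | nil => rfl
        | cons e r2 => simp [List.countP_cons]
      simp only [tok, List.length_cons, List.zip_cons_cons, List.tail_cons, List.countP_cons] at *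
      rw [hz] at *
      simp at *
      omega
  | case4 c d rest hcd ih =>
      have hp : (c == 'T' && d == 'h') = false := by
        by_contra h
        simp only [Bool.not_eq_false, Bool.and_eq_true, beq_iff_eq] at h
        exact hcd ⟨h.1, h.2⟩
      rw [tok, if_neg hcd]
      have hz : ((c :: d :: rest).zip (d :: rest)).countP (fun p => p.1 == 'T' && p.2 == 'h')
          = ((d :: rest).zip rest).countP (fun p => p.1 == 'T' && p.2 == 'h') := by
        simp [List.countP_cons, hp]
      simp only [List.tail_cons] at ih ⊢
      rw [hz]
      simp only [List.length_cons] at ih ⊢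
      omega

-- A's indexed interleave equals B's zip/join when b is long enough
theorem interleave_spec (g : List (List Char)) (b : List Char) (acc : List Char)
    (h : g.length ≤ b.length) :
    (List.range g.length).foldl (fun s i => s ++ g.getD i [] ++ [b.getD i ' ']) acc
      = acc ++ ((g.zip b).map (fun p => p.1 ++ [p.2])).flatten := by
  induction g generalizing b acc with
  | nil => simp
  | cons t ts ih =>
      cases b with
      | nil => simp at h
      | cons c cs =>
          rw [List.length_cons, List.range_succ_eq_map]
          simp only [List.foldl_cons, List.foldl_map, List.getD_cons_zero, List.getD_cons_succ]
          rw [ih cs (acc ++ t ++ [c]) (by simpa using h)]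
          simp

-- ===== VERDICT (by name: the statement is the Claim_ definition above) =====
theorem convert_course_date_spec : Claim_equal_convert_course_date := by
  intro date _dom pre
  unfold Spec_convert_course_date convert_course_date convert_course_date_alt
  unfold Pre_convert_course_date at pre
  dsimp only at pre ⊢
  set test := (PySem.Str.splitMax? date " " 1).getD [] with htest
  set a := (test.getD 0 "").toList with ha
  set b := (test.getD 1 "").toList with hb
  obtain ⟨hlen, hineq⟩ := pre
  have hcnt := tok_length a
  have hble : (tok a).length ≤ b.length := by omega
  have hmerge : mergeA (a.map (fun c => [c])).length (a.map (fun c => [c])) 0 = tok a := by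
    simpa using mergeA_spec a [] (a.map (fun c => [c])).length (by simp)
  have hfold : a.foldl (fun ts c =>
      if c = 'h' ∧ ts ≠ [] ∧ ts.getLast? = some ['T'] then
        ts.dropLast ++ [(ts.getLast?).getD [] ++ [c]]
      else ts ++ [[c]]) [] = tok a := by
    simpa [stepB] using foldB_spec a [] (by simp)
  rw [hmerge, hfold]
  rw [interleave_spec (tok a) b [] hble]
  simp
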